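-- pv_equiv track=rewrite | github.com/wwidlishy/The-Lea-Compiler | source/lea.py | orderlns
-- ===== SOURCE A (Python) =====
-- def orderlns(tokens) -> list:
--     index, current, order = -1, [], []
--     for i in tokens:
--         index += 1
--         if i == ['special', 'endline']:
--             order.append(current)
--             current = []
--         else:
--             current.append(i)
--
--     order.append(current)
--     return order
-- ===== SOURCE B (Python) =====
-- def orderlns(tokens) -> list:
--     # B: recursive split — find the first endline marker, slice off the segment
--     # before it, recurse on the remainder; no marker means a single segment.
--     try:
--         k = tokens.index(['special', 'endline'])
--     except ValueError:
--         return [tokens]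
--     return [tokens[:k]] + orderlns(tokens[k + 1:])
-- ===== Notes on version B (the rewrite author's own statement) =====
-- stated objective: alternative
-- what changed: Replaces A's single accumulator loop (current segment + collected segments) by a recursive decomposition: list.index finds the first endline marker, a slice gives the segment before it, and the function recurses on the tail after the marker; no marker yields the single trailing segment.
import Mathlib
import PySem

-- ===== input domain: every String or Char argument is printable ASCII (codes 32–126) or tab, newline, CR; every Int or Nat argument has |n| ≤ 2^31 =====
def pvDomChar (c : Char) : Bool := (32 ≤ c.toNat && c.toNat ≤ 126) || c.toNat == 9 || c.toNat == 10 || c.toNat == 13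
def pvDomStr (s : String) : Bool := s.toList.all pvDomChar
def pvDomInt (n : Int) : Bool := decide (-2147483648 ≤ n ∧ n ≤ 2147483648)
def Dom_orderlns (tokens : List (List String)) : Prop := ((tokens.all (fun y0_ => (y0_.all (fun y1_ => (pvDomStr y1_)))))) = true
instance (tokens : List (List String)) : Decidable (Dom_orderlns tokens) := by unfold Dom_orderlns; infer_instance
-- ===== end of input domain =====

-- B replaces A's accumulator loop by recursion on the first endline marker (alternative decomposition, same cost).

-- ===== PORT A =====
-- for-loop over tokens with state (index, current, order); the trailing segment is appended at the end
def orderlns (tokens : List (List String)) : List (List (List String)) :=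
  let s := tokens.foldl
    (fun (s : Int × List (List String) × List (List (List String))) i =>
      let index := s.1 + 1
      if i == ["special", "endline"] then (index, [], s.2.2 ++ [s.2.1])
      else (index, s.2.1 ++ [i], s.2.2))
    (-1, [], [])
  s.2.2 ++ [s.2.1]

-- ===== PORT B =====
-- tokens.index(m) → PySem.List.index?; tokens[:k] / tokens[k+1:] → PySem.List.slice
def orderlns_alt (tokens : List (List String)) : List (List (List String)) :=
  match h : PySem.List.index? tokens ["special", "endline"] with
  | none => [tokens]
  | some k =>
      [PySem.List.slice tokens none (some (k : Int))] ++
        orderlns_alt (PySem.List.slice tokens (some ((k : Int) + 1)) none)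
termination_by tokens.length
decreasing_by
  have hk : ((k : Int) + 1) = ((k + 1 : Nat) : Int) := by push_cast; ring
  rw [hk, PySem.List.slice_from_natCast]
  have hmem : ["special", "endline"] ∈ tokens :=
    (PySem.List.index?_isSome_iff tokens _).mp (by rw [h]; rfl)
  have : 0 < tokens.length := List.length_pos_of_mem hmem
  simp
  omega

-- ===== PRECONDITION & SPEC =====
def Spec_orderlns (tokens : List (List String)) (out : List (List (List String))) : Prop := out = orderlns_alt tokens
instance (tokens : List (List String)) (out : List (List (List String))) : Decidable (Spec_orderlns tokens out) := by unfold Spec_orderlns; infer_instance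

-- ===== CLAIM (what is proved, stated in full; the proofs are below) =====
def Claim_equal_orderlns : Prop := ∀ (tokens : List (List String)), Dom_orderlns tokens → Spec_orderlns tokens (orderlns tokens)

-- ===== LEMMAS AND PROOFS =====

lemma alt_ne_nil (tokens : List (List String)) : orderlns_alt tokens ≠ [] := by
  rw [orderlns_alt]
  split <;> simp

lemma alt_of_none (ts : List (List String))
    (h : PySem.List.index? ts ["special", "endline"] = none) :
    orderlns_alt ts = [ts] := by
  rw [orderlns_alt]
  split
  · rfl
  · rename_i k hk; rw [h] at hk; exact absurd hk (by simp)

lemma alt_of_some (ts : List (List String)) (j : Nat)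
    (h : PySem.List.index? ts ["special", "endline"] = some j) :
    orderlns_alt ts = [ts.take j] ++ orderlns_alt (ts.drop (j + 1)) := by
  rw [orderlns_alt]
  split
  · rename_i hk; rw [h] at hk; exact absurd hk (by simp)
  · rename_i k hk
    rw [h] at hk
    injection hk with hk; subst hk
    have h1 : ((j : Int) + 1) = (((j + 1 : Nat)) : Int) := by push_cast; ring
    rw [h1, PySem.List.slice_from_natCast, PySem.List.slice_to_natCast]

-- how orderlns_alt unfolds across a cons
lemma alt_cons (t : List String) (ts : List (List String)) :
    orderlns_alt (t :: ts) =
      if t = ["special", "endline"] then [] :: orderlns_alt ts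
      else match orderlns_alt ts with
        | [] => [[t]]
        | x :: xs => (t :: x) :: xs := by
  by_cases ht : t = ["special", "endline"]
  · subst ht
    rw [alt_of_some _ 0 (PySem.List.index?_cons_self _ _)]
    simp
  · rw [if_neg ht]
    cases hidx : PySem.List.index? ts ["special", "endline"] with
    | none =>
      have hidx' : PySem.List.index? (t :: ts) ["special", "endline"] = none := by
        rw [PySem.List.index?_cons_of_ne ts ht, hidx]; rfl
      rw [alt_of_none _ hidx', alt_of_none _ hidx]
    | some j =>
      have hidx' : PySem.List.index? (t :: ts) ["special", "endline"] = some (j + 1) := by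
        rw [PySem.List.index?_cons_of_ne ts ht, hidx]; rfl
      rw [alt_of_some _ _ hidx', alt_of_some _ _ hidx]
      simp

-- A's loop, from an arbitrary state, in terms of orderlns_alt
lemma loop_eq (ts : List (List String)) :
    ∀ (idx : Int) (current : List (List String)) (order : List (List (List String))),
      (let s := ts.foldl
        (fun (s : Int × List (List String) × List (List (List String))) i =>
          let index := s.1 + 1
          if i == ["special", "endline"] then (index, [], s.2.2 ++ [s.2.1])
          else (index, s.2.1 ++ [i], s.2.2)) (idx, current, order)
       s.2.2 ++ [s.2.1]) =
      order ++ (match orderlns_alt ts with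
        | [] => [current]
        | x :: xs => (current ++ x) :: xs) := by
  induction ts with
  | nil =>
    intro idx current order
    rw [alt_of_none [] (by rfl)]
    simp
  | cons t ts ih =>
    intro idx current order
    by_cases ht : t = ["special", "endline"]
    · subst ht
      simp only [List.foldl_cons, beq_self_eq_true, if_true]
      rw [ih]
      rw [alt_cons]
      simp only [if_true]
      cases hA : orderlns_alt ts with
      | nil => exact absurd hA (alt_ne_nil ts)
      | cons x xs => simp
    · simp only [List.foldl_cons]
      rw [if_neg (by simp [ht])]
      rw [ih]
      rw [alt_cons, if_neg ht]
      cases hA : orderlns_alt ts with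
      | nil => simp
      | cons x xs => simp

-- ===== VERDICT (by name: the statement is the Claim_ definition above) =====
theorem orderlns_spec : Claim_equal_orderlns := by
  intro tokens _
  unfold Spec_orderlns orderlns
  rw [loop_eq]
  cases hA : orderlns_alt tokens with
  | nil => exact absurd hA (alt_ne_nil tokens)
  | cons x xs => simp
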